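-- pv_equiv track=rewrite | github.com/houdak/Rosalind | FrequentOperations.py | CountBreakagePoints
-- ===== SOURCE A (Python) =====
-- def CountBreakagePoints(p):
--     """ Counts Breakage Points in a permutation,
--     including those at the beginning and end of the sequence """
--     p = [0] + p + [11]
--
--     count = 0
--     dir = None
--     for i in range(1,len(p)):
--         if dir == None:
--             if p[i] == p[i-1] + 1:
--                 dir = 'ascend'
--             elif p[i] == p[i-1] - 1:
--                 dir = 'descend'
--             else:
--                 count += 1
--         elif dir == 'ascend':
--             if p[i] != p[i-1] + 1:
--                 dir = None
--                 count += 1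
--         elif dir == 'descend':
--             if p[i] != p[i-1] - 1:
--                 dir = None
--                 count += 1
--     return count
-- ===== SOURCE B (Python) =====
-- def CountBreakagePoints(p):
--     """ Counts Breakage Points in a permutation,
--     including those at the beginning and end of the sequence """
--     q = [0] + p + [11]
--     steps = [q[i + 1] - q[i] for i in range(len(q) - 1)]
--     count = 0
--     j = 0
--     m = len(steps)
--     while j < m:
--         d = steps[j]
--         j += 1
--         if d == 1 or d == -1:
--             # consume the rest of this monotone run
--             while j < m and steps[j] == d:
--                 j += 1
--             if j < m:
--                 # the step that ended the run is a breakage point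
--                 count += 1
--                 j += 1
--         else:
--             count += 1
--     return count
-- ===== Notes on version B (the rewrite author's own statement) =====
-- stated objective: alternative
-- what changed: Replaces A's tri-state (None/ascend/descend) per-element finite-state machine over adjacent elements by a precomputed step-difference list segmented into maximal monotone runs: each run's remaining steps are skipped by an inner scan and the step ending a run is counted as one breakage point.
import Mathlib
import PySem

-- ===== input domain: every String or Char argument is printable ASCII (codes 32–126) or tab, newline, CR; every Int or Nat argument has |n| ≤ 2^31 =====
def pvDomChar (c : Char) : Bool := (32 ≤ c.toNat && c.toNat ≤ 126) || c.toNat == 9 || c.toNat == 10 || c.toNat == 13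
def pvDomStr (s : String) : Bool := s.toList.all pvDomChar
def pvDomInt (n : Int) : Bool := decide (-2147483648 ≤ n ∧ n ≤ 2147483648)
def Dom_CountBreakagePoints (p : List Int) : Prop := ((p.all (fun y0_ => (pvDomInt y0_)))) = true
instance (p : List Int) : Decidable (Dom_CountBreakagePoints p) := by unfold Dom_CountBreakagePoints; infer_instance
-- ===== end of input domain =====

-- B replaces A's tri-state FSM by segmenting the precomputed step list into maximal monotone runs (objective: alternative decomposition, same cost).

-- ===== PORT A =====
-- the loop body of A's 'for i in range(1, len(p))', dir ported as Option String (None/'ascend'/'descend')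
def CountBreakagePoints_step (q : List Int) (s : Int × Option String) (i : Int) : Int × Option String :=
  let count := s.1
  let dir := s.2
  let pi := PySem.List.pyGetD q i 0
  let pm := PySem.List.pyGetD q (i - 1) 0
  if dir = none then
    if pi = pm + 1 then (count, some "ascend")
    else if pi = pm - 1 then (count, some "descend")
    else (count + 1, dir)
  else if dir = some "ascend" then
    if pi ≠ pm + 1 then (count + 1, none) else (count, dir)
  else if dir = some "descend" then
    if pi ≠ pm - 1 then (count + 1, none) else (count, dir)
  else (count, dir)

def CountBreakagePoints (p : List Int) : Int :=
  let q : List Int := [0] ++ p ++ [11]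
  ((PySem.List.pyRange 1 (q.length : Int) 1).foldl (CountBreakagePoints_step q) (0, none)).1

-- ===== PORT B =====
-- 'while j < m and steps[j] == d: j += 1' — skip the remaining steps of the current run
def CountBreakagePoints_skip (steps : List Int) (d : Int) (j : Nat) : Nat :=
  if h : j < steps.length ∧ PySem.List.pyGetD steps (j : Int) 0 = d then
    CountBreakagePoints_skip steps d (j + 1)
  else j
termination_by steps.length - j

theorem CountBreakagePoints_skip_ge (steps : List Int) (d : Int) (j : Nat) :
    j ≤ CountBreakagePoints_skip steps d j := by
  unfold CountBreakagePoints_skip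
  split
  · exact le_trans (Nat.le_succ j) (CountBreakagePoints_skip_ge steps d (j + 1))
  · exact le_refl j
termination_by steps.length - j
decreasing_by omega

-- the outer 'while j < m' loop of B
def CountBreakagePoints_loop (steps : List Int) (count : Int) (j : Nat) : Int :=
  if h : j < steps.length then
    let d := PySem.List.pyGetD steps (j : Int) 0
    if d = 1 ∨ d = -1 then
      let j2 := CountBreakagePoints_skip steps d (j + 1)
      if h2 : j2 < steps.length then CountBreakagePoints_loop steps (count + 1) (j2 + 1)
      else count
    else CountBreakagePoints_loop steps (count + 1) (j + 1)
  else count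
termination_by steps.length - j
decreasing_by
  · have := CountBreakagePoints_skip_ge steps (PySem.List.pyGetD steps (j : Int) 0) (j + 1); omega
  · omega

def CountBreakagePoints_alt (p : List Int) : Int :=
  let q : List Int := [0] ++ p ++ [11]
  let steps : List Int :=
    (PySem.List.pyRange 0 ((q.length : Int) - 1) 1).map
      (fun i => PySem.List.pyGetD q (i + 1) 0 - PySem.List.pyGetD q i 0)
  CountBreakagePoints_loop steps 0 0

-- ===== PRECONDITION & SPEC =====
def Spec_CountBreakagePoints (p : List Int) (out : Int) : Prop := out = CountBreakagePoints_alt p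
instance (p : List Int) (out : Int) : Decidable (Spec_CountBreakagePoints p out) := by unfold Spec_CountBreakagePoints; infer_instance

-- ===== CLAIM (what is proved, stated in full; the proofs are below) =====
def Claim_equal_CountBreakagePoints : Prop := ∀ (p : List Int), Dom_CountBreakagePoints p → Spec_CountBreakagePoints p (CountBreakagePoints p)

-- ===== LEMMAS AND PROOFS =====

-- the list of adjacent differences of q
def pvDiffs : List Int → List Int
  | x :: y :: r => (y - x) :: pvDiffs (y :: r)
  | _ => []

-- A's state machine, re-expressed directly over the difference list
def pvFsm : Option String → List Int → Int
  | _, [] => 0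
  | none, d :: ds =>
      if d = 1 then pvFsm (some "ascend") ds
      else if d = -1 then pvFsm (some "descend") ds
      else 1 + pvFsm none ds
  | some a, d :: ds =>
      if a = "ascend" then (if d ≠ 1 then 1 + pvFsm none ds else pvFsm (some a) ds)
      else if a = "descend" then (if d ≠ -1 then 1 + pvFsm none ds else pvFsm (some a) ds)
      else pvFsm (some a) ds

-- B's run-segmentation, re-expressed over the difference list
def pvRuns : List Int → Int
  | [] => 0
  | d :: ds =>
      if d = 1 ∨ d = -1 then
        match h : ds.dropWhile (fun x => x == d) with
        | [] => 0
        | _ :: r => 1 + pvRuns r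
      else 1 + pvRuns ds
termination_by ds => ds.length
decreasing_by
  · have h1 : (ds.dropWhile (fun x => x == d)).length ≤ ds.length := List.length_dropWhile_le _ _
    rw [h] at h1; simp at h1 ⊢; omega
  · simp

theorem pvDiffs_map_range (x : Int) (t : List Int) :
    (List.range t.length).map (fun k => (x :: t).getD (k + 1) 0 - (x :: t).getD k 0)
      = pvDiffs (x :: t) := by
  induction t generalizing x with
  | nil => simp [pvDiffs]
  | cons y r ih =>
    have htail : List.map ((fun k => (x :: y :: r).getD (k + 1) 0 - (x :: y :: r).getD k 0) ∘ Nat.succ)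
        (List.range r.length) = pvDiffs (y :: r) := by
      rw [← ih y]
      apply List.map_congr_left
      intro k _
      simp [Function.comp]
    simp only [List.length_cons, List.range_succ_eq_map, List.map_cons, List.map_map]
    rw [pvDiffs, htail]
    norm_num [List.getD_cons_succ, List.getD_cons_zero]

-- A's transition as a function of the difference alone
def pvStepD (s : Int × Option String) (d : Int) : Int × Option String :=
  if s.2 = none then
    if d = 1 then (s.1, some "ascend")
    else if d = -1 then (s.1, some "descend")
    else (s.1 + 1, s.2)
  else if s.2 = some "ascend" then
    if d ≠ 1 then (s.1 + 1, none) else (s.1, s.2)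
  else if s.2 = some "descend" then
    if d ≠ -1 then (s.1 + 1, none) else (s.1, s.2)
  else (s.1, s.2)

theorem pvA_step_eq (q : List Int) (s : Int × Option String) (i : Int) :
    CountBreakagePoints_step q s i
      = pvStepD s (PySem.List.pyGetD q i 0 - PySem.List.pyGetD q (i - 1) 0) := by
  unfold CountBreakagePoints_step pvStepD
  simp only
  obtain ⟨c, dir⟩ := s
  set pi := PySem.List.pyGetD q i 0
  set pm := PySem.List.pyGetD q (i - 1) 0
  have h1 : (pi = pm + 1) ↔ (pi - pm = 1) := by omega
  have h2 : (pi = pm - 1) ↔ (pi - pm = -1) := by omega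
  have h3 : (pi ≠ pm + 1) ↔ (pi - pm ≠ 1) := by omega
  have h4 : (pi ≠ pm - 1) ↔ (pi - pm ≠ -1) := by omega
  simp only [h1, h2, h3, h4]

theorem pvFsm_foldl (ds : List Int) (c : Int) (dir : Option String) :
    (ds.foldl pvStepD (c, dir)).1 = c + pvFsm dir ds := by
  induction ds generalizing c dir with
  | nil => simp [pvFsm]
  | cons d ds ih =>
    rw [List.foldl_cons]
    match dir with
    | none =>
      by_cases h1 : d = 1
      · have hs : pvStepD (c, none) d = (c, some "ascend") := by simp [pvStepD, h1]
        rw [hs, ih]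
        simp [pvFsm, h1]
      · by_cases h2 : d = -1
        · have hs : pvStepD (c, none) d = (c, some "descend") := by simp [pvStepD, h2]
          rw [hs, ih]
          simp [pvFsm, h2]
        · have hs : pvStepD (c, none) d = (c + 1, none) := by simp [pvStepD, h1, h2]
          rw [hs, ih]
          simp [pvFsm, h1, h2]
          ring
    | some a =>
      by_cases ha : a = "ascend"
      · subst ha
        by_cases h1 : d = 1
        · have hs : pvStepD (c, some "ascend") d = (c, some "ascend") := by
            simp [pvStepD, h1]
          rw [hs, ih]
          simp [pvFsm, h1]
        · have hs : pvStepD (c, some "ascend") d = (c + 1, none) := by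
            simp [pvStepD, h1]
          rw [hs, ih]
          simp [pvFsm, h1]
          ring
      · by_cases hd : a = "descend"
        · subst hd
          by_cases h1 : d = -1
          · have hs : pvStepD (c, some "descend") d = (c, some "descend") := by
              simp [pvStepD, h1]
            rw [hs, ih]
            simp [pvFsm, h1]
          · have hs : pvStepD (c, some "descend") d = (c + 1, none) := by
              simp [pvStepD, h1]
            rw [hs, ih]
            simp [pvFsm, h1]
            ring
        · have hs : pvStepD (c, some a) d = (c, some a) := by
            simp [pvStepD, ha, hd]
          rw [hs, ih]
          simp [pvFsm, ha, hd]

-- A's result is the FSM run over the difference list of q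
theorem pvA_eq_fsm (q : List Int) (hq : q ≠ []) :
    ((PySem.List.pyRange 1 (q.length : Int) 1).foldl (CountBreakagePoints_step q) (0, none)).1
      = pvFsm none (pvDiffs q) := by
  match q, hq with
  | x :: t, _ =>
    have hr : PySem.List.pyRange 1 ((x :: t).length : Int) 1
        = (List.range t.length).map (fun k : Nat => (1 : Int) + (k : Int)) := by
      rw [PySem.List.pyRange_one]
      congr 1
      congr 1
      simp
    rw [hr, List.foldl_map]
    have hstep : ∀ (s : Int × Option String) (k : Nat), k ∈ List.range t.length →
        CountBreakagePoints_step (x :: t) s ((1 : Int) + k)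
          = pvStepD s ((x :: t).getD (k + 1) 0 - (x :: t).getD k 0) := by
      intro s k _
      rw [pvA_step_eq]
      have e1 : (1 : Int) + k = ((k + 1 : Nat) : Int) := by omega
      have e2 : (1 : Int) + k - 1 = ((k : Nat) : Int) := by omega
      rw [e2, e1, PySem.List.pyGetD_natCast, PySem.List.pyGetD_natCast]
    rw [PySem.List.foldl_congr_mem (List.range t.length)
      (fun s y => CountBreakagePoints_step (x :: t) s (1 + (y : Int)))
      (fun s k => pvStepD s ((x :: t).getD (k + 1) 0 - (x :: t).getD k 0)) (0, none)
      (fun acc k hk => hstep acc k hk)]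
    rw [← List.foldl_map, pvDiffs_map_range, pvFsm_foldl]
    ring

-- skipping a run = dropping the equal-step prefix
theorem pvSkip_drop (steps : List Int) (d : Int) (j : Nat) :
    steps.drop (CountBreakagePoints_skip steps d j) = (steps.drop j).dropWhile (fun x => x == d) := by
  unfold CountBreakagePoints_skip
  split
  · rename_i h
    obtain ⟨hj, he⟩ := h
    rw [PySem.List.pyGetD_natCast] at he
    have hv : steps[j] = d := by rw [List.getD_eq_getElem steps 0 hj] at he; exact he
    rw [pvSkip_drop steps d (j + 1), List.drop_eq_getElem_cons hj, List.dropWhile_cons, hv]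
    simp
  · rename_i h
    by_cases hj : j < steps.length
    · have he : ¬ PySem.List.pyGetD steps (j : Int) 0 = d := fun hc => h ⟨hj, hc⟩
      rw [PySem.List.pyGetD_natCast] at he
      rw [List.drop_eq_getElem_cons hj, List.dropWhile_cons]
      have : (steps[j] == d) = false := by
        simp only [beq_eq_false_iff_ne, ne_eq]
        intro hc
        apply he
        rw [List.getD_eq_getElem steps 0 hj, hc]
      simp [this]
    · have : steps.drop j = [] := List.drop_eq_nil_of_le (by omega)
      simp [this]
termination_by steps.length - j

-- B's loop computes pvRuns of the remaining steps
theorem pvLoop_eq_runs (steps : List Int) (c : Int) (j : Nat) :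
    CountBreakagePoints_loop steps c j = c + pvRuns (steps.drop j) := by
  rw [CountBreakagePoints_loop]
  split
  · rename_i hj
    dsimp only
    set d := PySem.List.pyGetD steps (j : Int) 0 with hd
    have hdv : d = steps[j] := by
      rw [hd, PySem.List.pyGetD_natCast, List.getD_eq_getElem steps 0 hj]
    have hdrop : steps.drop j = steps[j] :: steps.drop (j + 1) := List.drop_eq_getElem_cons hj
    split
    · rename_i hpm
      have hskip := pvSkip_drop steps d (j + 1)
      split
      · rename_i h2
        rw [pvLoop_eq_runs]
        rw [hdrop, pvRuns, if_pos (by rw [← hdv]; exact hpm)]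
        rw [← hdv, ← hskip]
        have hcons : steps.drop (CountBreakagePoints_skip steps d (j + 1))
            = steps[CountBreakagePoints_skip steps d (j + 1)]
              :: steps.drop (CountBreakagePoints_skip steps d (j + 1) + 1) :=
          List.drop_eq_getElem_cons h2
        rw [hcons]
        ring
      · rename_i h2
        rw [hdrop, pvRuns, if_pos (by rw [← hdv]; exact hpm)]
        rw [← hdv, ← hskip]
        have : steps.drop (CountBreakagePoints_skip steps d (j + 1)) = [] :=
          List.drop_eq_nil_of_le (by omega)
        rw [this]
        ring
    · rename_i hpm
      rw [pvLoop_eq_runs]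
      rw [hdrop, pvRuns, if_neg (by rw [← hdv]; exact hpm)]
      ring
  · rename_i hj
    have : steps.drop j = [] := List.drop_eq_nil_of_le (by omega)
    rw [this, pvRuns]
    ring
termination_by steps.length - j
decreasing_by
  all_goals
    have h1 := CountBreakagePoints_skip_ge steps (PySem.List.pyGetD steps (↑j) 0) (j + 1)
    omega

-- the ascend/descend state of the FSM, characterised by dropWhile
theorem pvFsm_run (a : String) (v : Int) (ha : (a = "ascend" ∧ v = 1) ∨ (a = "descend" ∧ v = -1))
    (ds : List Int) :
    pvFsm (some a) ds
      = match ds.dropWhile (fun x => x == v) with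
        | [] => 0
        | _ :: r => 1 + pvFsm none r := by
  induction ds with
  | nil => simp [pvFsm]
  | cons d ds ih =>
    by_cases hdv : d = v
    · subst hdv
      have h1 : pvFsm (some a) (d :: ds) = pvFsm (some a) ds := by
        rcases ha with ⟨h, hv⟩ | ⟨h, hv⟩ <;> subst h <;> subst hv <;> simp [pvFsm]
      rw [h1, ih, List.dropWhile_cons]
      simp
    · have h1 : pvFsm (some a) (d :: ds) = 1 + pvFsm none ds := by
        rcases ha with ⟨h, hv⟩ | ⟨h, hv⟩ <;> subst h <;> subst hv <;> simp [pvFsm, hdv]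
      rw [h1, List.dropWhile_cons]
      have : (d == v) = false := by simp [hdv]
      simp [this]

-- the two characterisations agree
theorem pvFsm_eq_runs (ds : List Int) : pvFsm none ds = pvRuns ds := by
  match ds with
  | [] => simp [pvFsm, pvRuns]
  | d :: ds =>
    by_cases h1 : d = 1
    · subst h1
      rw [pvRuns, if_pos (Or.inl rfl)]
      have := pvFsm_run "ascend" 1 (Or.inl ⟨rfl, rfl⟩) ds
      rw [pvFsm, if_pos rfl, this]
      rcases hdw : ds.dropWhile (fun x => x == (1 : Int)) with _ | ⟨y, r⟩
      · simp
      · have hlen : r.length < ds.length + 1 := by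
          have h1 : (ds.dropWhile (fun x => x == (1 : Int))).length ≤ ds.length :=
            List.length_dropWhile_le _ _
          rw [hdw] at h1; simp at h1; omega
        show (1 : Int) + pvFsm none r = 1 + pvRuns r
        rw [pvFsm_eq_runs r]
    · by_cases h2 : d = -1
      · subst h2
        rw [pvRuns, if_pos (Or.inr rfl)]
        have := pvFsm_run "descend" (-1) (Or.inr ⟨rfl, rfl⟩) ds
        rw [pvFsm]
        simp only [show ((-1 : Int) = 1) = False by simp, if_false, if_true]
        rw [this]
        rcases hdw : ds.dropWhile (fun x => x == (-1 : Int)) with _ | ⟨y, r⟩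
        · simp
        · have hlen : r.length < ds.length + 1 := by
            have h1 : (ds.dropWhile (fun x => x == (-1 : Int))).length ≤ ds.length :=
              List.length_dropWhile_le _ _
            rw [hdw] at h1; simp at h1; omega
          show (1 : Int) + pvFsm none r = 1 + pvRuns r
          rw [pvFsm_eq_runs r]
      · rw [pvRuns, if_neg (by tauto), pvFsm, if_neg h1, if_neg h2, pvFsm_eq_runs ds]
termination_by ds.length

-- B's step list is pvDiffs q
theorem pvB_steps (q : List Int) (hq : q ≠ []) :
    (PySem.List.pyRange 0 ((q.length : Int) - 1) 1).map
        (fun i => PySem.List.pyGetD q (i + 1) 0 - PySem.List.pyGetD q i 0)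
      = pvDiffs q := by
  match q, hq with
  | x :: t, _ =>
    rw [PySem.List.pyRange_one]
    have hlen : (((x :: t).length : Int) - 1 - 0).toNat = t.length := by simp
    rw [hlen, List.map_map]
    rw [← pvDiffs_map_range x t]
    apply List.map_congr_left
    intro k _
    simp only [Function.comp]
    have e1 : (0 : Int) + k + 1 = ((k + 1 : Nat) : Int) := by omega
    have e2 : (0 : Int) + k = ((k : Nat) : Int) := by omega
    rw [e1, e2, PySem.List.pyGetD_natCast, PySem.List.pyGetD_natCast]

-- ===== VERDICT (by name: the statement is the Claim_ definition above) =====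
theorem CountBreakagePoints_spec : Claim_equal_CountBreakagePoints := by
  intro p _
  unfold Spec_CountBreakagePoints CountBreakagePoints CountBreakagePoints_alt
  simp only
  have hq : ([0] ++ p ++ [11] : List Int) ≠ [] := by simp
  rw [pvA_eq_fsm _ hq, pvB_steps _ hq, pvLoop_eq_runs, List.drop_zero, pvFsm_eq_runs]
  ring
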